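-- pv_equiv track=rewrite | github.com/feelosophy13/bioinformatics_algorithm_1 | module2.py | get_kmer_freq_cnt_aprx_match
-- ===== SOURCE A (Python) =====
-- def calc_Hamming_dist(DNA_str1, DNA_str2):
--     if len(DNA_str1) == len(DNA_str2):
--         n_mismatches = 0
--         for i in range(0, len(DNA_str1)):
--             if DNA_str1[i] != DNA_str2[i]:
--                 n_mismatches += 1
--         return n_mismatches
--     return None
--
-- def get_kmer_freq_cnt_aprx_match(DNA_str, ptrn, d):
--     freq_cnt = 0
--     ptrn_len = len(ptrn)
--     n_iter = len(DNA_str) - ptrn_len + 1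
--     for i in range(0, n_iter):
--         kmer = DNA_str[i:i+ptrn_len]
--         if calc_Hamming_dist(kmer, ptrn) <= d:
--             freq_cnt += 1
--     return freq_cnt
-- ===== SOURCE B (Python) =====
-- def get_kmer_freq_cnt_aprx_match(DNA_str, ptrn, d):
--     k = len(ptrn)
--     counts = {}
--     for i in range(len(DNA_str) - k + 1):
--         w = DNA_str[i:i+k]
--         counts[w] = counts.get(w, 0) + 1
--     total = 0
--     for w, c in counts.items():
--         if sum(a != b for a, b in zip(w, ptrn)) <= d:
--             total += c
--     return total
-- ===== Notes on version B (the rewrite author's own statement) =====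
-- stated objective: alternative
-- what changed: B groups the windows into a counter dict in one pass and performs the zip-based mismatch test once per DISTINCT k-mer, adding its multiplicity, instead of A's per-window call into an index-loop Hamming-distance helper.
import Mathlib
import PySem

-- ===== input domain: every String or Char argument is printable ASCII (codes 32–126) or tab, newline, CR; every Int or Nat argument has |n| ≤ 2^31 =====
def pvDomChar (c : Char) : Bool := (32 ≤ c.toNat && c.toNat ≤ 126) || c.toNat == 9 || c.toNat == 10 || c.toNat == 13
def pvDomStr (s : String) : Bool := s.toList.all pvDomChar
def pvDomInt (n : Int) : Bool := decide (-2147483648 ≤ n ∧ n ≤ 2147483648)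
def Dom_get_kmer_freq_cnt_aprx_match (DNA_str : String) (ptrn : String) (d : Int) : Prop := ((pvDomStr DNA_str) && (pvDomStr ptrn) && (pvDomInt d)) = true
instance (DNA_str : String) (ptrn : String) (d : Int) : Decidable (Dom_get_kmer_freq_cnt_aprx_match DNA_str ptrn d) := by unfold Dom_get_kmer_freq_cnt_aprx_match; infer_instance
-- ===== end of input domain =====

-- B replaces A's per-window Hamming-distance helper call by a one-pass counter of the windows
-- followed by one distance test per DISTINCT k-mer (alternative decomposition; same worst-case cost).

-- ===== PORT A =====
-- helper calc_Hamming_dist, on code-point lists (strings are handled as their .toList throughout)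
def calc_Hamming_dist (DNA_str1 : List Char) (DNA_str2 : List Char) : Option Int :=
  if DNA_str1.length = DNA_str2.length then
    some ((PySem.List.pyRange 0 (DNA_str1.length : Int) 1).foldl
      (fun n_mismatches i =>
        -- index i is always in range here; ' ' default never read
        if PySem.List.pyGetD DNA_str1 i ' ' ≠ PySem.List.pyGetD DNA_str2 i ' ' then n_mismatches + 1
        else n_mismatches) 0)
  else none

def get_kmer_freq_cnt_aprx_match (DNA_str : String) (ptrn : String) (d : Int) : Int :=
  let s := DNA_str.toList
  let p := ptrn.toList
  let ptrn_len : Int := p.length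
  let n_iter : Int := s.length - ptrn_len + 1
  (PySem.List.pyRange 0 n_iter 1).foldl (fun freq_cnt i =>
    let kmer := PySem.List.slice s (some i) (some (i + ptrn_len))
    match calc_Hamming_dist kmer p with
    | some h => if h ≤ d then freq_cnt + 1 else freq_cnt
    | none => freq_cnt  -- unreachable: every kmer has ptrn's length (Python would raise comparing None <= d)
  ) 0

-- ===== PORT B =====
-- sum(a != b for a, b in zip(w, ptrn))
def pvZipMismatch (w : List Char) (p : List Char) : Int :=
  ((w.zip p).map (fun ab => if ab.1 ≠ ab.2 then (1 : Int) else 0)).sum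

def get_kmer_freq_cnt_aprx_match_alt (DNA_str : String) (ptrn : String) (d : Int) : Int :=
  let s := DNA_str.toList
  let p := ptrn.toList
  let k : Int := p.length
  let counts : PySem.Dict (List Char) Int :=
    (PySem.List.pyRange 0 ((s.length : Int) - k + 1) 1).foldl
      (fun dct i =>
        let w := PySem.List.slice s (some i) (some (i + k))
        dct.insert w (dct.getD w 0 + 1)) PySem.Dict.empty
  counts.items.foldl (fun total wc =>
      if pvZipMismatch wc.1 p ≤ d then total + wc.2 else total) 0

-- ===== PRECONDITION & SPEC =====
def Spec_get_kmer_freq_cnt_aprx_match (DNA_str : String) (ptrn : String) (d : Int) (out : Int) : Prop := out = get_kmer_freq_cnt_aprx_match_alt DNA_str ptrn d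
instance (DNA_str : String) (ptrn : String) (d : Int) (out : Int) : Decidable (Spec_get_kmer_freq_cnt_aprx_match DNA_str ptrn d out) := by unfold Spec_get_kmer_freq_cnt_aprx_match; infer_instance

-- ===== CLAIM (what is proved, stated in full; the proofs are below) =====
def Claim_equal_get_kmer_freq_cnt_aprx_match : Prop := ∀ (DNA_str : String) (ptrn : String) (d : Int), Dom_get_kmer_freq_cnt_aprx_match DNA_str ptrn d → Spec_get_kmer_freq_cnt_aprx_match DNA_str ptrn d (get_kmer_freq_cnt_aprx_match DNA_str ptrn d)

-- ===== LEMMAS AND PROOFS =====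

-- length of a window slice
lemma pv_slice_len (s : List Char) (k i : Int) (hk : 0 ≤ k) (h0 : 0 ≤ i) (h1 : i + k ≤ (s.length : Int)) :
    (PySem.List.slice s (some i) (some (i + k))).length = k.toNat := by
  rw [PySem.List.slice_of_nonneg s h0 (by omega) (by omega) (by omega)]
  simp only [List.length_take, List.length_drop]
  omega

-- the index-loop Hamming count equals the zip-mismatch sum, on equal lengths
lemma pv_countP_range_zip (w p : List Char) (h : w.length = p.length) :
    (List.range w.length).countP (fun j => decide (w.getD j ' ' ≠ p.getD j ' ')) =
      (w.zip p).countP (fun ab => decide (ab.1 ≠ ab.2)) := by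
  induction w generalizing p with
  | nil => simp
  | cons a w ih =>
    cases p with
    | nil => simp at h
    | cons b p =>
      simp only [List.length_cons, List.range_succ_eq_map, List.countP_cons, List.countP_map,
        List.zip_cons_cons]
      have := ih p (by simpa using h)
      simp only [List.getD_cons_zero, List.getD_cons_succ, Function.comp_def] at *
      omega

lemma pv_ham_eq (w p : List Char) (h : w.length = p.length) :
    (PySem.List.pyRange 0 (w.length : Int) 1).foldl
      (fun n i => if PySem.List.pyGetD w i ' ' ≠ PySem.List.pyGetD p i ' ' then n + 1 else n) 0
    = pvZipMismatch w p := by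
  rw [PySem.List.pyRange_zero_natCast, List.foldl_map]
  have : ∀ (acc : Int), ∀ j ∈ List.range w.length,
      (if PySem.List.pyGetD w (j : Int) ' ' ≠ PySem.List.pyGetD p (j : Int) ' ' then acc + 1 else acc)
      = (if w.getD j ' ' ≠ p.getD j ' ' then acc + 1 else acc) := by
    intro acc j _
    simp [PySem.List.pyGetD_natCast]
  rw [PySem.List.foldl_congr_mem _ _ _ _ this,
      PySem.List.foldl_ite_add_one (fun j => w.getD j ' ' ≠ p.getD j ' ')]
  rw [pv_countP_range_zip w p h]
  unfold pvZipMismatch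
  rw [show (fun ab : Char × Char => if ab.1 ≠ ab.2 then (1 : Int) else 0)
        = (fun ab : Char × Char => if decide (ab.1 ≠ ab.2) = true then (1 : Int) else 0) by
        funext ab; split_ifs with h1 h2 <;> simp_all,
      PySem.List.sum_map_ite_one_zero]
  simp

-- sum over a nodup key list of "count in ws if predicate else 0" is countP over ws
lemma pv_sum_ite_eq_single (ks : List (List Char)) (w : List Char) (c : Int)
    (hnd : ks.Nodup) (hw : w ∈ ks) :
    (ks.map (fun k => if k = w then c else 0)).sum = c := by
  induction ks with
  | nil => simp at hw
  | cons a t ih =>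
    rcases List.nodup_cons.mp hnd with ⟨ha, hnt⟩
    by_cases haw : a = w
    · subst haw
      have : (t.map (fun k => if k = a then c else 0)).sum = 0 := by
        apply List.sum_eq_zero
        intro x hx
        rcases List.mem_map.mp hx with ⟨k, hk, rfl⟩
        have : ¬ k = a := fun e => ha (e ▸ hk)
        simp [this]
      simp [this]
    · have hw' : w ∈ t := by
        rcases List.mem_cons.mp hw with h | h
        · exact absurd h.symm haw
        · exact h
      simp [haw, ih hnt hw']

lemma pv_sum_count_eq_countP (ws ks : List (List Char)) (q : List Char → Prop) [DecidablePred q]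
    (hnd : ks.Nodup) (hmem : ∀ x ∈ ws, x ∈ ks) :
    (ks.map (fun k => if q k then (ws.count k : Int) else 0)).sum
      = (ws.countP (fun x => decide (q x)) : Int) := by
  induction ws with
  | nil =>
    simp only [List.count_nil, List.countP_nil, Nat.cast_zero]
    exact List.sum_eq_zero (by intro x hx; rcases List.mem_map.mp hx with ⟨k, _, rfl⟩; split_ifs <;> simp)
  | cons w t ih =>
    have hmt : ∀ x ∈ t, x ∈ ks := fun x hx => hmem x (List.mem_cons_of_mem _ hx)
    have hwks : w ∈ ks := hmem w List.mem_cons_self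
    have step : ∀ k ∈ ks,
        (if q k then ((w :: t).count k : Int) else 0)
          = (if q k then (t.count k : Int) else 0) + (if k = w then (if q w then (1:Int) else 0) else 0) := by
      intro k _
      by_cases hkw : k = w
      · subst hkw; simp [List.count_cons_self]; split_ifs <;> simp
      · have hkw' : ¬ w = k := fun e => hkw e.symm
        have : (w :: t).count k = t.count k := by
          simp [hkw']
        rw [this]; simp [hkw]
    rw [List.map_congr_left step, PySem.List.sum_map_add_int, ih hmt,
        pv_sum_ite_eq_single ks w _ hnd hwks, List.countP_cons]
    split_ifs with h1 h2 <;> simp_all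

-- both ports equal countP of the mismatch test over the window list
lemma pv_A_eq (s p : List Char) (d : Int) :
    (PySem.List.pyRange 0 ((s.length : Int) - (p.length : Int) + 1) 1).foldl (fun freq_cnt i =>
      match calc_Hamming_dist (PySem.List.slice s (some i) (some (i + (p.length : Int)))) p with
      | some h => if h ≤ d then freq_cnt + 1 else freq_cnt
      | none => freq_cnt) 0
    = ((((PySem.List.pyRange 0 ((s.length : Int) - (p.length : Int) + 1) 1).map
          (fun i => PySem.List.slice s (some i) (some (i + (p.length : Int))))).countP
          (fun w => decide (pvZipMismatch w p ≤ d)) : Nat) : Int) := by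
  have hcongr : ∀ (acc : Int), ∀ i ∈ PySem.List.pyRange 0 ((s.length : Int) - (p.length : Int) + 1) 1,
      (match calc_Hamming_dist (PySem.List.slice s (some i) (some (i + (p.length : Int)))) p with
       | some h => if h ≤ d then acc + 1 else acc
       | none => acc)
      = (if pvZipMismatch (PySem.List.slice s (some i) (some (i + (p.length : Int)))) p ≤ d
         then acc + 1 else acc) := by
    intro acc i hi
    rcases PySem.List.mem_pyRange_one.mp hi with ⟨h0, h1⟩
    have hlen : (PySem.List.slice s (some i) (some (i + (p.length : Int)))).length = p.length := by
      rw [pv_slice_len s _ i (by omega) h0 (by omega)]; omega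
    have hham := pv_ham_eq _ p hlen
    rw [calc_Hamming_dist, if_pos hlen, hham]
  rw [PySem.List.foldl_congr_mem _ _ _ _ hcongr,
      PySem.List.foldl_ite_add_one
        (fun i => pvZipMismatch (PySem.List.slice s (some i) (some (i + (p.length : Int)))) p ≤ d),
      List.countP_map]
  simp [Function.comp_def]

lemma pv_B_eq (s p : List Char) (d : Int) :
    get_kmer_freq_cnt_aprx_match_alt (String.ofList s) (String.ofList p) d
    = ((((PySem.List.pyRange 0 ((s.length : Int) - (p.length : Int) + 1) 1).map
          (fun i => PySem.List.slice s (some i) (some (i + (p.length : Int))))).countP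
          (fun w => decide (pvZipMismatch w p ≤ d)) : Nat) : Int) := by
  unfold get_kmer_freq_cnt_aprx_match_alt
  simp only [String.toList_ofList]
  set ws := (PySem.List.pyRange 0 ((s.length : Int) - (p.length : Int) + 1) 1).map
      (fun i => PySem.List.slice s (some i) (some (i + (p.length : Int)))) with hws
  have hdict : (PySem.List.pyRange 0 ((s.length : Int) - (p.length : Int) + 1) 1).foldl
        (fun dct i =>
          dct.insert (PySem.List.slice s (some i) (some (i + (p.length : Int))))
            (dct.getD (PySem.List.slice s (some i) (some (i + (p.length : Int)))) 0 + 1))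
        PySem.Dict.empty
      = PySem.Dict.counter ws := by
    rw [← PySem.Dict.foldl_insert_getD_add_one_eq_counter, hws, List.foldl_map]
  rw [hdict]
  have hstep : ∀ (acc : Int), ∀ wc ∈ (PySem.Dict.counter ws).items,
      (if pvZipMismatch wc.1 p ≤ d then acc + wc.2 else acc)
      = acc + (if pvZipMismatch wc.1 p ≤ d then wc.2 else 0) := by
    intro acc wc _; split_ifs <;> ring
  rw [PySem.List.foldl_congr_mem _ _ _ _ hstep, PySem.List.foldl_add, PySem.Dict.items_counter,
      List.map_map]
  rw [show ((fun wc : List Char × Int => if pvZipMismatch wc.1 p ≤ d then wc.2 else 0) ∘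
        fun k => (k, (ws.count k : Int)))
      = (fun k => if pvZipMismatch k p ≤ d then (ws.count k : Int) else 0) by rfl]
  rw [pv_sum_count_eq_countP ws (PySem.Set.ofList ws) (fun k => pvZipMismatch k p ≤ d)
        (PySem.Set.nodup_ofList ws) (fun x hx => (PySem.Set.mem_ofList ws x).mpr hx)]
  simp

-- ===== VERDICT (by name: the statement is the Claim_ definition above) =====
theorem get_kmer_freq_cnt_aprx_match_spec : Claim_equal_get_kmer_freq_cnt_aprx_match := by
  intro DNA_str ptrn d _
  unfold Spec_get_kmer_freq_cnt_aprx_match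
  have hB := pv_B_eq DNA_str.toList ptrn.toList d
  rw [String.ofList_toList, String.ofList_toList] at hB
  rw [hB]
  unfold get_kmer_freq_cnt_aprx_match
  exact pv_A_eq DNA_str.toList ptrn.toList d
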